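-- pv_equiv track=rewrite | github.com/MuhammetSonmez/Zhu-Takaoka-Algorithm | Zhu-Takaoka.py | zhu_takaoka
-- ===== SOURCE A (Python) =====
-- def zhu_takaoka(path):
--     points = list(range(len(path)))
--     #points listesi, path indislerini içeren bir listeye atanır.
--     key = []
--     #anahtar listesi başlangıçta boş bir değer olarak atanır
--     while len(points) > 0:
--         leftmost_point = min(points)
--         #leftmost_point, anahtar listesine eklenir.
--         key.append(leftmost_point)
--         # leftmost_point'tan daha büyük olan tüm elemanlar points listesinden çıkarılır.
--         points = [p for p in points if p > leftmost_point]
--         #path[leftmost_point]'den daha büyük olan tüm elemanlar right_points listesine atanır.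
--         right_points = [p for p in points if path[p] > path[leftmost_point]]
--         # right_points listesi boş değilse,
--         if len(right_points) > 0:
--             # rightmost_point, right_points listesindeki en küçük elemanı alır.
--             rightmost_point = min(right_points)
--             key.append(rightmost_point)
--             # rightmost_point, anahtar listesine eklenir.
--             points = [p for p in points if p < rightmost_point]
--             # rightmost_point'tan küçük olan tüm elemanlar points listesinden çıkarılır.
--     return key # Anahtar listesi döndürülür.
-- ===== SOURCE B (Python) =====
-- def zhu_takaoka(path):
--     # Window simulation: instead of repeatedly rebuilding candidate lists with
--     # min() and filters, keep the current window [i, hi) as two indices and scan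
--     # only until the first larger element.
--     key = []
--     i, hi = 0, len(path)
--     while i < hi:
--         key.append(i)
--         j = next((k for k in range(i + 1, hi) if path[k] > path[i]), None)
--         if j is not None:
--             key.append(j)
--             hi = j
--         i += 1
--     return key
-- ===== Notes on version B (the rewrite author's own statement) =====
-- stated objective: faster
-- what changed: B replaces A's repeated min()+three list-comprehension filters over a candidate list by a two-index window [i, hi) that is shrunk in place, scanning only until the first larger element is found.
import Mathlib
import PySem

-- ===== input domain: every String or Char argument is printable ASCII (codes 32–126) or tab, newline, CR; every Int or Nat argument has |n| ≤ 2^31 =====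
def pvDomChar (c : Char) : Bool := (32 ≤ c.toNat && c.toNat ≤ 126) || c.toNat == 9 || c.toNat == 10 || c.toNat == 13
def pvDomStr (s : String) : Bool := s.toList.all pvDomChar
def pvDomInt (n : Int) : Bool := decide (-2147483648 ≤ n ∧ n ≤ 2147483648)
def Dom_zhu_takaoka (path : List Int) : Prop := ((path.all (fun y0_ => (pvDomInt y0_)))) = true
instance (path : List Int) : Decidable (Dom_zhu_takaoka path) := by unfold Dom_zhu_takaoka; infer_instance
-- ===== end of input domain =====

-- B replaces A's repeated min()+filter rebuilding of a candidate list by a two-index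
-- window simulation (objective: faster by a constant factor / shorter scans).

-- ===== PORT A =====
-- Literal port of A's while-loop. `fuel` is only a totality guard (each iteration
-- removes at least one point, so `path.length + 1` is always enough).
-- `path[p]` is ported as `pyGetD path p 0`; every index A uses lies in range, so this is exact.
def zhuLoopA (path : List Int) : Nat → List Int → List Int → List Int
  | 0, _, key => key
  | fuel+1, points, key =>
    if points.length > 0 then
      match PySem.List.min? points (fun x => x) with
      | none => key  -- unreachable: points is nonempty
      | some leftmost =>
        let key1 := key ++ [leftmost]
        let points1 := points.filter (fun p => leftmost < p)
        let right_points := points1.filter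
          (fun p => PySem.List.pyGetD path leftmost 0 < PySem.List.pyGetD path p 0)
        if right_points.length > 0 then
          match PySem.List.min? right_points (fun x => x) with
          | none => key1  -- unreachable: right_points is nonempty
          | some rightmost =>
            zhuLoopA path fuel (points1.filter (fun p => p < rightmost)) (key1 ++ [rightmost])
        else
          zhuLoopA path fuel points1 key1
    else key

def zhu_takaoka (path : List Int) : List Int :=
  zhuLoopA path (path.length + 1) (PySem.List.pyRange 0 path.length 1) []

-- ===== PORT B =====
-- Literal port of Source B's window loop. All loop indices of Source B stay in [0, len(path)],
-- so they are carried as Nat; `range(i+1, hi)` is `List.range' (i+1) (hi-(i+1))` and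
-- `next((k for k in … if path[k] > path[i]), None)` is `find?`; `path[k]` is `getD`
-- (every index used is in range, so this is exact). `fuel` is only a totality guard
-- (i increases each iteration and stays below hi ≤ len(path)).
def zhuAltLoop (path : List Int) : Nat → Nat → Nat → List Int → List Int
  | 0, _, _, key => key
  | fuel+1, i, hi, key =>
    if i < hi then
      match (List.range' (i+1) (hi-(i+1))).find? (fun k => path.getD i 0 < path.getD k 0) with
      | some j => zhuAltLoop path fuel (i+1) j (key ++ [(i : Int), (j : Int)])
      | none => zhuAltLoop path fuel (i+1) hi (key ++ [(i : Int)])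
    else key

def zhu_takaoka_alt (path : List Int) : List Int :=
  zhuAltLoop path (path.length + 1) 0 path.length []

-- ===== PRECONDITION & SPEC =====
def Spec_zhu_takaoka (path : List Int) (out : List Int) : Prop := out = zhu_takaoka_alt path
instance (path : List Int) (out : List Int) : Decidable (Spec_zhu_takaoka path out) := by unfold Spec_zhu_takaoka; infer_instance

-- ===== CLAIM (what is proved, stated in full; the proofs are below) =====
def Claim_equal_zhu_takaoka : Prop := ∀ (path : List Int), Dom_zhu_takaoka path → Spec_zhu_takaoka path (zhu_takaoka path)

-- ===== LEMMAS AND PROOFS =====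

-- A's candidate list is always the interval [lo, hi) of indices, as Ints.
def intList (lo hi : Nat) : List Int := (List.range' lo (hi - lo)).map (fun (k : Nat) => (k : Int))

theorem foldl_min_of_le (l : List Int) (a : Int) (h : ∀ x ∈ l, a ≤ x) :
    l.foldl min a = a := by
  induction l generalizing a with
  | nil => rfl
  | cons b t ih =>
    have hb : a ≤ b := h b (by simp)
    simp only [List.foldl_cons, min_eq_left hb]
    exact ih a (fun x hx => h x (by simp [hx]))

theorem find?_eq_head?_filter {α : Type} (p : α → Bool) (l : List α) :
    l.find? p = (l.filter p).head? := by
  induction l with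
  | nil => rfl
  | cons a t ih =>
    cases h : p a with
    | true =>
      rw [List.find?_cons_of_pos h, List.filter_cons_of_pos h, List.head?_cons]
    | false =>
      rw [List.find?_cons_of_neg (by simp [h]), List.filter_cons_of_neg (by simp [h]), ih]

theorem min?_map_cast (l : List Nat) (hp : l.Pairwise (· < ·)) (j : Nat)
    (hh : l.head? = some j) :
    PySem.List.min? (l.map (fun (k : Nat) => (k : Int))) (fun x => x) = some (j : Int) := by
  cases l with
  | nil => simp at hh
  | cons a t =>
    rw [List.map_cons, PySem.List.min?_id_cons]
    have hfold : (t.map (fun (k : Nat) => (k : Int))).foldl min (a : Int) = (a : Int) := by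
      apply foldl_min_of_le
      intro x hx
      simp only [List.mem_map] at hx
      obtain ⟨k, hk, rfl⟩ := hx
      exact_mod_cast ((List.pairwise_cons.mp hp).1 k hk).le
    simp only [List.head?_cons, Option.some.injEq] at hh
    rw [hfold, hh]

theorem range'_filter_lt (j : Nat) : ∀ (n a : Nat),
    (List.range' a n).filter (fun k => decide (k < j)) = List.range' a (min n (j - a)) := by
  intro n
  induction n with
  | zero => intro a; simp
  | succ m ih =>
    intro a
    rw [List.range'_succ, List.filter_cons]
    by_cases h : a < j
    · have h1 : min (m + 1) (j - a) = (min m (j - (a+1))) + 1 := by omega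
      simp only [h, decide_true, ih (a+1), h1, List.range'_succ, if_true]
    · have h1 : min (m + 1) (j - a) = 0 := by omega
      have h2 : (List.range' (a+1) m).filter (fun k => decide (k < j)) = [] := by
        rw [List.filter_eq_nil_iff]
        intro k hk
        have := (List.mem_range'_1.mp hk).1
        simp; omega
      simp [h, h2, h1]

-- The main loop correspondence: A's loop on the interval [lo, hi) equals B's loop on (lo, hi).
theorem loop_eq (path : List Int) : ∀ (fuel lo hi : Nat) (key : List Int),
    hi - lo ≤ fuel →
    zhuLoopA path fuel (intList lo hi) key = zhuAltLoop path fuel lo hi key := by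
  intro fuel
  induction fuel with
  | zero => intro lo hi key _; rfl
  | succ f ih =>
    intro lo hi key hfuel
    by_cases hlt : lo < hi
    · -- split the interval: [lo, hi) = lo :: [lo+1, hi)
      have h1 : hi - lo = (hi - (lo + 1)) + 1 := by omega
      have hsplit : intList lo hi = (lo : Int) :: intList (lo + 1) hi := by
        unfold intList
        rw [h1, List.range'_succ, List.map_cons]
      have hne : (intList lo hi).length > 0 := by rw [hsplit]; simp
      -- min of the interval is lo
      have hmin : PySem.List.min? (intList lo hi) (fun x => x) = some (lo : Int) := by
        apply min?_map_cast
        · exact List.pairwise_lt_range'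
        · rw [h1, List.range'_succ]; rfl
      -- the "> leftmost" filter keeps exactly the tail interval
      have hpts1 : (intList lo hi).filter (fun p => decide ((lo : Int) < p)) =
          intList (lo + 1) hi := by
        rw [hsplit, List.filter_cons]
        simp only [lt_irrefl, decide_false, if_false, Bool.false_eq_true]
        rw [List.filter_eq_self]
        intro x hx
        unfold intList at hx
        simp only [List.mem_map] at hx
        obtain ⟨k, hk, rfl⟩ := hx
        have hk1 := (List.mem_range'_1.mp hk).1
        simp only [decide_eq_true_eq]
        exact_mod_cast Nat.lt_of_lt_of_le (Nat.lt_succ_self lo) hk1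
      -- the right_points filter, pushed through the cast
      have hright : (intList (lo + 1) hi).filter
            (fun p => decide (PySem.List.pyGetD path (lo : Int) 0 < PySem.List.pyGetD path p 0)) =
          ((List.range' (lo+1) (hi-(lo+1))).filter
            (fun k => decide (path.getD lo 0 < path.getD k 0))).map (fun (k : Nat) => (k : Int)) := by
        unfold intList
        rw [List.filter_map]
        congr 1
        apply List.filter_congr
        intro k _
        simp [Function.comp, PySem.List.pyGetD_natCast]
      rw [zhuLoopA, zhuAltLoop, if_pos hne, if_pos hlt, hmin]
      simp only [hpts1, hright]
      rcases hfind : (List.range' (lo+1) (hi-(lo+1))).find?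
          (fun k => decide (path.getD lo 0 < path.getD k 0)) with _ | j
      · -- no next-greater element in the window
        have hfe : (List.range' (lo+1) (hi-(lo+1))).filter
            (fun k => decide (path.getD lo 0 < path.getD k 0)) = [] := by
          rw [← List.head?_eq_none_iff, ← find?_eq_head?_filter, hfind]
        rw [hfe]
        simp only [List.map_nil, List.length_nil, gt_iff_lt, lt_irrefl, if_false]
        exact ih (lo+1) hi (key ++ [(lo : Int)]) (by omega)
      · -- next-greater element j found
        have hmem : j ∈ List.range' (lo+1) (hi-(lo+1)) := List.mem_of_find?_eq_some hfind
        have hj1 : lo + 1 ≤ j := (List.mem_range'_1.mp hmem).1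
        have hj2 : j < hi := by have := (List.mem_range'_1.mp hmem).2; omega
        have hhead : ((List.range' (lo+1) (hi-(lo+1))).filter
            (fun k => decide (path.getD lo 0 < path.getD k 0))).head? = some j := by
          rw [← find?_eq_head?_filter, hfind]
        have hlen : (((List.range' (lo+1) (hi-(lo+1))).filter
            (fun k => decide (path.getD lo 0 < path.getD k 0))).map (fun (k : Nat) => (k : Int))).length > 0 := by
          cases hc : (List.range' (lo+1) (hi-(lo+1))).filter
              (fun k => decide (path.getD lo 0 < path.getD k 0)) with
          | nil => rw [hc] at hhead; simp at hhead
          | cons a t => simp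
        have hminr : PySem.List.min? (((List.range' (lo+1) (hi-(lo+1))).filter
              (fun k => decide (path.getD lo 0 < path.getD k 0))).map (fun (k : Nat) => (k : Int)))
            (fun x => x) = some (j : Int) := by
          apply min?_map_cast
          · exact List.Pairwise.filter _ List.pairwise_lt_range'
          · exact hhead
        rw [if_pos hlen, hminr]
        -- the "< rightmost" filter shrinks the interval to [lo+1, j)
        have hpts2 : (intList (lo + 1) hi).filter (fun p => decide (p < (j : Int))) =
            intList (lo + 1) j := by
          unfold intList
          rw [List.filter_map]
          have hc : ((fun p => decide (p < (j : Int))) ∘ (fun (k : Nat) => (k : Int))) =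
              (fun (k : Nat) => decide (k < j)) := by
            funext k; simp [Function.comp]
          rw [hc, range'_filter_lt]
          congr 2
          omega
        simp only [hpts2, List.append_assoc, List.singleton_append]
        exact ih (lo+1) j (key ++ [(lo : Int), (j : Int)]) (by omega)
    · -- empty window: both loops return key
      have hnil : intList lo hi = [] := by
        unfold intList
        have h0 : hi - lo = 0 := by omega
        rw [h0, List.range'_zero, List.map_nil]
      rw [zhuLoopA, zhuAltLoop, hnil, if_neg (by simp), if_neg hlt]

-- the initial points list is the full interval [0, n)
theorem init_points (n : Nat) : PySem.List.pyRange 0 (n : Int) 1 = intList 0 n := by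
  rw [PySem.List.pyRange_one]
  unfold intList
  simp [List.range_eq_range']

-- ===== VERDICT (by name: the statement is the Claim_ definition above) =====
theorem zhu_takaoka_spec : Claim_equal_zhu_takaoka := by
  intro path _
  unfold Spec_zhu_takaoka zhu_takaoka zhu_takaoka_alt
  rw [init_points]
  exact loop_eq path (path.length + 1) 0 path.length [] (by omega)
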